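-- pv_equiv track=rewrite | github.com/kugendran-naidoo/QTopoQA | qtdaqa/new_dynamic_features/model_training2/tools/feature_lottery_ticket.py | _group_topology_columns
-- ===== SOURCE A (Python) =====
-- from typing import Dict, Iterable, List, Optional, Sequence, Tuple
--
-- def _infer_slot_id(column: str) -> str:
--     if column.startswith("base."):
--         return "base"
--     if column.startswith("cross."):
--         return "cross"
--     if column.startswith("polar."):
--         return "polar"
--     if column.startswith("primary."):
--         parts = column.split(".")
--         if len(parts) >= 2:
--             return ".".join(parts[:2])
--     if column.startswith("pair."):
--         parts = column.split(".")
--         if len(parts) >= 2: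
--             return ".".join(parts[:2])
--     if column.startswith("typed_primary."):
--         parts = column.split(".")
--         if len(parts) >= 2:
--             return ".".join(parts[:2])
--     if column.startswith("typed_pair."):
--         parts = column.split(".")
--         if len(parts) >= 2:
--             return ".".join(parts[:2])
--     if column.startswith("strat."):
--         parts = column.split(".")
--         if len(parts) >= 4:
--             return ".".join(parts[:4])
--     if "." in column:
--         return column.split(".", 1)[0]
--     return column
--
-- def _group_topology_columns(topo_cols: Sequence[str], mode: str) -> Dict[str, List[str]]:
--     groups: Dict[str, List[str]] = {}
--     if mode == "column":
--         for col in topo_cols: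
--             groups[col] = [col]
--         return groups
--     for col in topo_cols:
--         slot = _infer_slot_id(col)
--         groups.setdefault(slot, []).append(col)
--     return groups
-- ===== SOURCE B (Python) =====
-- from typing import Dict, List, Sequence
--
-- # depth of the slot id (in '.'-separated parts), keyed by the column's first part
-- _SLOT_DEPTH = {
--     "base": 1,
--     "cross": 1,
--     "polar": 1,
--     "primary": 2,
--     "pair": 2,
--     "typed_primary": 2,
--     "typed_pair": 2,
--     "strat": 4,
-- }
--
-- def _infer_slot_id(column: str) -> str:
--     parts = column.split(".")
--     n = _SLOT_DEPTH.get(parts[0], 1)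
--     if len(parts) < n:
--         n = 1
--     return ".".join(parts[:n])
--
-- def _group_topology_columns(topo_cols: Sequence[str], mode: str) -> Dict[str, List[str]]:
--     if mode == "column":
--         return {col: [col] for col in topo_cols}
--     # staged passes: slot per column, then ordered-unique slots, then one group per slot
--     slots = [_infer_slot_id(col) for col in topo_cols]
--     return {s: [col for col, sl in zip(topo_cols, slots) if sl == s]
--             for s in dict.fromkeys(slots)}
-- ===== Notes on version B (the rewrite author's own statement) =====
-- stated objective: alternative
-- what changed: A's single grouping loop that setdefault-appends into a dict keyed by an eight-branch startswith chain is replaced by staged passes: compute every column's slot with one split plus a depth table, take the ordered-unique slots via dict.fromkeys, then build each group in one comprehension by filtering the zipped (column, slot) list.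
import Mathlib
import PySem

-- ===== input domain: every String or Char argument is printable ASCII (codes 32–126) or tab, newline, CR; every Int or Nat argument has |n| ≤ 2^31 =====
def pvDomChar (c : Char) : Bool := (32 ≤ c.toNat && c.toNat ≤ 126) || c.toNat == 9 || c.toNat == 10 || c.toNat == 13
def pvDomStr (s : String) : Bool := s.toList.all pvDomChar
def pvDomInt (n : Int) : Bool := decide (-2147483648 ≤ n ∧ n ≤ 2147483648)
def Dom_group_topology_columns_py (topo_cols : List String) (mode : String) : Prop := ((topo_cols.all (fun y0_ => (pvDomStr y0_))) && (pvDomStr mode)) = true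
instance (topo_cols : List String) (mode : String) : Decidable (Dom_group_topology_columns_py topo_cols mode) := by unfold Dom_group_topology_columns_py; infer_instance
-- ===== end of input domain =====

-- B regroups in staged passes (slot per column, ordered-unique slots, one filtered group per
-- slot) and infers slots by one split plus a depth table, instead of A's single
-- setdefault-append loop over an eight-branch startswith chain (objective: alternative).

-- ===== PORT A =====
-- A's final two lines: column.split(".", 1)[0] if "." in column else column
def pvA_default (cs : List Char) : List Char :=
  if PySem.Chars.isIn ['.'] cs then
    PySem.List.pyGetD (PySem.Chars.splitOnMax cs ['.'] 1) 0 []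
  else cs

-- the 'if column.startswith("strat."): …' block; falls through to pvA_default
def pvA_strat (cs : List Char) : List Char :=
  if PySem.Chars.startswith cs "strat.".toList then
    let parts := PySem.Chars.splitOn cs ['.']
    if (4 : Int) ≤ PySem.List.len parts then
      PySem.Chars.join ['.'] (PySem.List.slice parts none (some 4))
    else pvA_default cs
  else pvA_default cs

def pvA_typedPair (cs : List Char) : List Char :=
  if PySem.Chars.startswith cs "typed_pair.".toList then
    let parts := PySem.Chars.splitOn cs ['.']
    if (2 : Int) ≤ PySem.List.len parts then
      PySem.Chars.join ['.'] (PySem.List.slice parts none (some 2))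
    else pvA_strat cs
  else pvA_strat cs

def pvA_typedPrimary (cs : List Char) : List Char :=
  if PySem.Chars.startswith cs "typed_primary.".toList then
    let parts := PySem.Chars.splitOn cs ['.']
    if (2 : Int) ≤ PySem.List.len parts then
      PySem.Chars.join ['.'] (PySem.List.slice parts none (some 2))
    else pvA_typedPair cs
  else pvA_typedPair cs

def pvA_pair (cs : List Char) : List Char :=
  if PySem.Chars.startswith cs "pair.".toList then
    let parts := PySem.Chars.splitOn cs ['.']
    if (2 : Int) ≤ PySem.List.len parts then
      PySem.Chars.join ['.'] (PySem.List.slice parts none (some 2))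
    else pvA_typedPrimary cs
  else pvA_typedPrimary cs

def pvA_primary (cs : List Char) : List Char :=
  if PySem.Chars.startswith cs "primary.".toList then
    let parts := PySem.Chars.splitOn cs ['.']
    if (2 : Int) ≤ PySem.List.len parts then
      PySem.Chars.join ['.'] (PySem.List.slice parts none (some 2))
    else pvA_pair cs
  else pvA_pair cs

def pvInferSlotA (cs : List Char) : List Char :=
  if PySem.Chars.startswith cs "base.".toList then "base".toList
  else if PySem.Chars.startswith cs "cross.".toList then "cross".toList
  else if PySem.Chars.startswith cs "polar.".toList then "polar".toList
  else pvA_primary cs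

def group_topology_columns_py (topo_cols : List String) (mode : String) : List (String × List String) :=
  if mode == "column" then
    (topo_cols.foldl (fun d col => d.insert col [col])
      (PySem.Dict.empty : PySem.Dict String (List String))).items
  else
    (topo_cols.foldl
      (fun d col => d.modify (String.ofList (pvInferSlotA col.toList)) [] (fun l => l ++ [col]))
      (PySem.Dict.empty : PySem.Dict String (List String))).items

-- ===== PORT B =====
def pvSlotDepth : PySem.Dict (List Char) Int :=
  PySem.Dict.ofList
    [("base".toList, 1), ("cross".toList, 1), ("polar".toList, 1),
     ("primary".toList, 2), ("pair".toList, 2),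
     ("typed_primary".toList, 2), ("typed_pair".toList, 2),
     ("strat".toList, 4)]

def pvInferSlotB (cs : List Char) : List Char :=
  let parts := PySem.Chars.splitOn cs ['.']
  let n0 : Int := pvSlotDepth.getD (PySem.List.pyGetD parts 0 []) 1
  let n : Int := if PySem.List.len parts < n0 then 1 else n0
  PySem.Chars.join ['.'] (PySem.List.slice parts none (some n))

def group_topology_columns_py_alt (topo_cols : List String) (mode : String) : List (String × List String) :=
  if mode == "column" then
    (PySem.Dict.ofList (topo_cols.map (fun col => (col, [col])))).items
  else
    -- slots = [_infer_slot_id(col) for col in topo_cols]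
    let slots := topo_cols.map (fun col => String.ofList (pvInferSlotB col.toList))
    -- {s: [col for col, sl in zip(topo_cols, slots) if sl == s] for s in dict.fromkeys(slots)}
    (PySem.Dict.ofList ((PySem.List.dedup slots).map (fun s =>
      (s, ((topo_cols.zip slots).filter (fun p => p.2 == s)).map (fun p => p.1))))).items

-- ===== PRECONDITION & SPEC =====
def Spec_group_topology_columns_py (topo_cols : List String) (mode : String) (out : List (String × List String)) : Prop := out = group_topology_columns_py_alt topo_cols mode
instance (topo_cols : List String) (mode : String) (out : List (String × List String)) : Decidable (Spec_group_topology_columns_py topo_cols mode out) := by unfold Spec_group_topology_columns_py; infer_instance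

-- ===== CLAIM (what is proved, stated in full; the proofs are below) =====
def Claim_equal_group_topology_columns_py : Prop := ∀ (topo_cols : List String) (mode : String), Dom_group_topology_columns_py topo_cols mode → Spec_group_topology_columns_py topo_cols mode (group_topology_columns_py topo_cols mode)

-- ===== LEMMAS AND PROOFS =====

def pvSplitDot : List Char → List (List Char)
  | [] => [[]]
  | c :: rest =>
    if c = '.' then [] :: pvSplitDot rest
    else
      match pvSplitDot rest with
      | p :: ps => (c :: p) :: ps
      | [] => [[c]]
theorem pvSplitDot_ne_nil (cs : List Char) : pvSplitDot cs ≠ [] := by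
  cases cs with
  | nil => simp [pvSplitDot]
  | cons c rest =>
    simp only [pvSplitDot]
    split
    · simp
    · split <;> simp_all

theorem pvSplitDot_no_dot (cs : List Char) (h : '.' ∉ cs) : pvSplitDot cs = [cs] := by
  induction cs with
  | nil => rfl
  | cons c rest ih =>
    simp only [List.mem_cons, not_or] at h
    have hc : c ≠ '.' := fun hh => h.1 hh.symm
    simp [pvSplitDot, hc, ih h.2]

theorem pvSplitDot_append (pre : List Char) (h : '.' ∉ pre) (r : List Char) :
    pvSplitDot (pre ++ '.' :: r) = pre :: pvSplitDot r := by
  induction pre with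
  | nil => simp [pvSplitDot]
  | cons c p ih =>
    simp only [List.mem_cons, not_or] at h
    have hc : c ≠ '.' := fun hh => h.1 hh.symm
    simp [pvSplitDot, hc, ih h.2]

theorem pv_takeWhile_pre (pre : List Char) (h : '.' ∉ pre) (r : List Char) :
    (pre ++ '.' :: r).takeWhile (· ≠ '.') = pre := by
  induction pre with
  | nil => simp
  | cons c p ih =>
    simp only [List.mem_cons, not_or] at h
    have hc : c ≠ '.' := fun hh => h.1 hh.symm
    simp [hc]
    simpa using ih h.2

theorem pv_dot_decomp (cs : List Char) (h : '.' ∈ cs) :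
    ∃ r, cs = cs.takeWhile (· ≠ '.') ++ '.' :: r ∧ '.' ∉ cs.takeWhile (· ≠ '.') := by
  induction cs with
  | nil => simp at h
  | cons c rest ih =>
    by_cases hc : c = '.'
    · subst hc
      exact ⟨rest, by simp, by simp⟩
    · have hr : '.' ∈ rest := by
        rcases List.mem_cons.mp h with h1 | h1
        · exact absurd h1.symm hc
        · exact h1
      obtain ⟨r, hdec, hnd⟩ := ih hr
      refine ⟨r, ?_, ?_⟩
      · simp only [List.takeWhile_cons, decide_eq_true_eq]
        rw [if_pos (by simpa using hc)]
        simpa using congrArg (c :: ·) hdec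
      · simp only [List.takeWhile_cons]
        rw [if_pos (by simpa using hc)]
        simp only [List.mem_cons, not_or]
        exact ⟨fun hh => hc hh.symm, by simpa using hnd⟩



theorem pv_goMax_zero (fuel : Nat) (l cur : List Char) (acc : List (List Char)) :
    PySem.Chars.splitOnMax.go ['.'] (fuel + 1) 0 l cur acc = ((cur.reverse ++ l) :: acc).reverse := by
  cases l <;> simp [PySem.Chars.splitOnMax.go]

theorem pv_goMax_one (fuel : Nat) : ∀ (l cur : List Char) (acc : List (List Char)),
    l.length < fuel →
    PySem.Chars.splitOnMax.go ['.'] fuel 1 l cur acc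
      = acc.reverse ++
        (if '.' ∈ l then [cur.reverse ++ l.takeWhile (· ≠ '.'), (l.dropWhile (· ≠ '.')).tail]
         else [cur.reverse ++ l]) := by
  induction fuel with
  | zero => intro l cur acc h; omega
  | succ f ih =>
    intro l cur acc h
    cases l with
    | nil => simp [PySem.Chars.splitOnMax.go]
    | cons c rest =>
      rw [PySem.Chars.splitOnMax.go]
      by_cases hc : c = '.'
      · subst hc
        have hpre : List.isPrefixOf ['.'] ('.' :: rest) = true := by simp [List.isPrefixOf]
        simp only [hpre, if_pos, List.length_cons, List.length_nil, List.drop_succ_cons,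
          List.drop_zero, if_neg (one_ne_zero)]
        obtain ⟨f', rfl⟩ : ∃ f', f = f' + 1 := ⟨f - 1, by simp only [List.length_cons] at h; omega⟩
        rw [show (1 : Nat) - 1 = 0 from rfl, pv_goMax_zero]
        simp
      · have hc' : c ≠ '.' := hc
        have hpre : List.isPrefixOf ['.'] (c :: rest) = false := by
          simp only [List.isPrefixOf, Bool.and_eq_false_iff, beq_eq_false_iff_ne, ne_eq]
          exact Or.inl fun (hh : '.' = c) => hc hh.symm
        simp only [hpre, Bool.false_eq_true, if_false, if_neg (one_ne_zero)]
        rw [ih rest (c :: cur) acc (by simpa using Nat.lt_of_succ_lt_succ h)]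
        by_cases hm : '.' ∈ rest
        · simp [hm, hc']
        · have hcc : ¬'.' = c := fun hh => hc hh.symm
          simp [hm, hcc]

theorem pvA_default_eq (cs : List Char) : pvA_default cs = cs.takeWhile (· ≠ '.') := by
  by_cases h : '.' ∈ cs
  · have hin : PySem.Chars.isIn ['.'] cs = true := by
      rw [PySem.Chars.isIn_iff_infix]; exact (List.singleton_infix_iff '.' cs).mpr h
    rw [pvA_default, if_pos hin, PySem.Chars.splitOnMax]
    rw [if_neg (by norm_num)]
    rw [show ((1 : Int)).toNat = 1 from rfl]
    rw [pv_goMax_one (cs.length + 1) cs [] [] (by omega)]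
    simp [h]
  · have hin : PySem.Chars.isIn ['.'] cs = false := by
      rw [PySem.Chars.isIn_eq_false_iff]
      exact fun hh => h ((List.singleton_infix_iff '.' cs).mp hh)
    rw [pvA_default, if_neg (by simp [hin])]
    rw [List.takeWhile_eq_self_iff.mpr]
    intro x hx
    simp only [decide_eq_true_eq, ne_eq]
    exact fun hh => h (hh ▸ hx)

theorem pvDepth_cases (k : List Char) :
    pvSlotDepth.getD k 1 = 1 ∨
    (pvSlotDepth.getD k 1 = 2 ∧
      (k = "primary".toList ∨ k = "pair".toList ∨ k = "typed_primary".toList ∨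
        k = "typed_pair".toList)) ∨
    (pvSlotDepth.getD k 1 = 4 ∧ k = "strat".toList) := by
  have htab : pvSlotDepth = PySem.Dict.mk
      [("base".toList, 1), ("cross".toList, 1), ("polar".toList, 1),
       ("primary".toList, 2), ("pair".toList, 2),
       ("typed_primary".toList, 2), ("typed_pair".toList, 2),
       ("strat".toList, 4)] := by decide
  rw [htab]
  simp only [PySem.Dict.getD, PySem.Dict.get?_mk_cons]
  split_ifs with h1 h2 h3 h4 h5 h6 h7 h8
  · exact Or.inl (by simp)
  · exact Or.inl (by simp)
  · exact Or.inl (by simp)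
  · exact Or.inr (Or.inl ⟨by simp, Or.inl (eq_of_beq h4).symm⟩)
  · exact Or.inr (Or.inl ⟨by simp, Or.inr (Or.inl (eq_of_beq h5).symm)⟩)
  · exact Or.inr (Or.inl ⟨by simp, Or.inr (Or.inr (Or.inl (eq_of_beq h6).symm))⟩)
  · exact Or.inr (Or.inl ⟨by simp, Or.inr (Or.inr (Or.inr (eq_of_beq h7).symm))⟩)
  · exact Or.inr (Or.inr ⟨by simp, (eq_of_beq h8).symm⟩)
  · exact Or.inl (by simp [PySem.Dict.get?])

theorem pv_modifyHead_id (xs : List (List Char)) : xs.modifyHead (fun x => x) = xs := by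
  cases xs <;> simp

-- splitOn.go on separator ['.'] computes pvSplitDot
theorem pv_go_eq (fuel : Nat) : ∀ (l cur : List Char) (acc : List (List Char)),
    l.length < fuel →
    PySem.Chars.splitOn.go ['.'] fuel l cur acc
      = acc.reverse ++ (pvSplitDot l).modifyHead (cur.reverse ++ ·) := by
  induction fuel with
  | zero => intro l cur acc h; omega
  | succ f ih =>
    intro l cur acc h
    cases l with
    | nil =>
      simp [PySem.Chars.splitOn.go, pvSplitDot]
    | cons c rest =>
      rw [PySem.Chars.splitOn.go]
      by_cases hc : c = '.'
      · subst hc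
        have hpre : List.isPrefixOf ['.'] ('.' :: rest) = true := by simp [List.isPrefixOf]
        simp only [hpre, if_pos, List.length_cons, List.length_nil, List.drop_succ_cons,
          List.drop_zero]
        rw [ih rest [] (cur.reverse :: acc) (by simpa using Nat.lt_of_succ_lt_succ h)]
        simp [pvSplitDot, pv_modifyHead_id]
      · have hpre : List.isPrefixOf ['.'] (c :: rest) = false := by
          simp only [List.isPrefixOf, Bool.and_eq_false_iff, beq_eq_false_iff_ne, ne_eq]
          exact Or.inl fun (h : '.' = c) => hc h.symm
        simp only [hpre, Bool.false_eq_true, if_false]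
        rw [ih rest (c :: cur) acc (by simpa using Nat.lt_of_succ_lt_succ h)]
        obtain ⟨p, ps, hps⟩ : ∃ p ps, pvSplitDot rest = p :: ps := by
          cases hr : pvSplitDot rest with
          | nil => exact absurd hr (pvSplitDot_ne_nil rest)
          | cons p ps => exact ⟨p, ps, rfl⟩
        simp [pvSplitDot, hc, hps]

theorem pvSplitOn_eq (cs : List Char) :
    PySem.Chars.splitOn cs ['.'] = pvSplitDot cs := by
  rw [PySem.Chars.splitOn, pv_go_eq (cs.length + 1) cs [] [] (by omega)]
  simp [pv_modifyHead_id]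



theorem pv_takeWhile_no_dot (cs : List Char) (h : '.' ∉ cs) :
    cs.takeWhile (· ≠ '.') = cs := by
  rw [List.takeWhile_eq_self_iff.mpr]
  intro x hx
  simp only [decide_eq_true_eq, ne_eq]
  exact fun hh => h (hh ▸ hx)

theorem pvInfer_eq (cs : List Char) : pvInferSlotA cs = pvInferSlotB cs := by
  by_cases h1 : PySem.Chars.startswith cs "base.".toList = true
  ·
    rw [PySem.Chars.startswith_iff] at h1
    obtain ⟨t, ht⟩ := h1
    have hcs : cs = "base".toList ++ '.' :: t := by rw [← ht]; rfl
    subst hcs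
    have hpos : PySem.Chars.startswith ("base".toList ++ '.' :: t) "base.".toList = true := by
      rw [PySem.Chars.startswith_iff]; exact ⟨t, rfl⟩
    simp only [pvInferSlotA, if_pos hpos]
    simp only [pvInferSlotB]
    rw [pvSplitOn_eq, pvSplitDot_append _ (by decide) _]
    rw [PySem.List.pyGetD_zero_cons]
    rw [show pvSlotDepth.getD "base".toList 1 = 1 from by decide]
    have hlen : 1 ≤ (pvSplitDot t).length := List.length_pos_of_ne_nil (pvSplitDot_ne_nil t)
    rw [if_neg (by simp only [PySem.List.len_eq, List.length_cons]; push_cast; omega)]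
    rw [PySem.List.slice_to _ (by norm_num)]
    simp [PySem.Chars.join_singleton]
  by_cases h2 : PySem.Chars.startswith cs "cross.".toList = true
  ·
    rw [PySem.Chars.startswith_iff] at h2
    obtain ⟨t, ht⟩ := h2
    have hcs : cs = "cross".toList ++ '.' :: t := by rw [← ht]; rfl
    subst hcs
    have hpos : PySem.Chars.startswith ("cross".toList ++ '.' :: t) "cross.".toList = true := by
      rw [PySem.Chars.startswith_iff]; exact ⟨t, rfl⟩
    simp only [pvInferSlotA]
    rw [if_neg h1, if_pos hpos]
    simp only [pvInferSlotB]
    rw [pvSplitOn_eq, pvSplitDot_append _ (by decide) _]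
    rw [PySem.List.pyGetD_zero_cons]
    rw [show pvSlotDepth.getD "cross".toList 1 = 1 from by decide]
    have hlen : 1 ≤ (pvSplitDot t).length := List.length_pos_of_ne_nil (pvSplitDot_ne_nil t)
    rw [if_neg (by simp only [PySem.List.len_eq, List.length_cons]; push_cast; omega)]
    rw [PySem.List.slice_to _ (by norm_num)]
    simp [PySem.Chars.join_singleton]
  by_cases h3 : PySem.Chars.startswith cs "polar.".toList = true
  ·
    rw [PySem.Chars.startswith_iff] at h3
    obtain ⟨t, ht⟩ := h3
    have hcs : cs = "polar".toList ++ '.' :: t := by rw [← ht]; rfl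
    subst hcs
    have hpos : PySem.Chars.startswith ("polar".toList ++ '.' :: t) "polar.".toList = true := by
      rw [PySem.Chars.startswith_iff]; exact ⟨t, rfl⟩
    simp only [pvInferSlotA]
    rw [if_neg h1, if_neg h2, if_pos hpos]
    simp only [pvInferSlotB]
    rw [pvSplitOn_eq, pvSplitDot_append _ (by decide) _]
    rw [PySem.List.pyGetD_zero_cons]
    rw [show pvSlotDepth.getD "polar".toList 1 = 1 from by decide]
    have hlen : 1 ≤ (pvSplitDot t).length := List.length_pos_of_ne_nil (pvSplitDot_ne_nil t)
    rw [if_neg (by simp only [PySem.List.len_eq, List.length_cons]; push_cast; omega)]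
    rw [PySem.List.slice_to _ (by norm_num)]
    simp [PySem.Chars.join_singleton]
  by_cases h4 : PySem.Chars.startswith cs "primary.".toList = true
  ·
    rw [PySem.Chars.startswith_iff] at h4
    obtain ⟨t, ht⟩ := h4
    have hcs : cs = "primary".toList ++ '.' :: t := by rw [← ht]; rfl
    subst hcs
    have hpos : PySem.Chars.startswith ("primary".toList ++ '.' :: t) "primary.".toList = true := by
      rw [PySem.Chars.startswith_iff]; exact ⟨t, rfl⟩
    simp only [pvInferSlotA]
    rw [if_neg h1, if_neg h2, if_neg h3, pvA_primary, if_pos hpos]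
    simp only [pvInferSlotB]
    rw [pvSplitOn_eq, pvSplitDot_append _ (by decide) _]
    rw [PySem.List.pyGetD_zero_cons]
    rw [show pvSlotDepth.getD "primary".toList 1 = 2 from by decide]
    have hlen : 1 ≤ (pvSplitDot t).length := List.length_pos_of_ne_nil (pvSplitDot_ne_nil t)
    rw [if_pos (by simp only [PySem.List.len_eq, List.length_cons]; push_cast; omega)]
    rw [if_neg (by simp only [PySem.List.len_eq, List.length_cons]; push_cast; omega)]
  by_cases h5 : PySem.Chars.startswith cs "pair.".toList = true
  ·
    rw [PySem.Chars.startswith_iff] at h5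
    obtain ⟨t, ht⟩ := h5
    have hcs : cs = "pair".toList ++ '.' :: t := by rw [← ht]; rfl
    subst hcs
    have hpos : PySem.Chars.startswith ("pair".toList ++ '.' :: t) "pair.".toList = true := by
      rw [PySem.Chars.startswith_iff]; exact ⟨t, rfl⟩
    simp only [pvInferSlotA]
    rw [if_neg h1, if_neg h2, if_neg h3, pvA_primary, if_neg h4, pvA_pair, if_pos hpos]
    simp only [pvInferSlotB]
    rw [pvSplitOn_eq, pvSplitDot_append _ (by decide) _]
    rw [PySem.List.pyGetD_zero_cons]
    rw [show pvSlotDepth.getD "pair".toList 1 = 2 from by decide]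
    have hlen : 1 ≤ (pvSplitDot t).length := List.length_pos_of_ne_nil (pvSplitDot_ne_nil t)
    rw [if_pos (by simp only [PySem.List.len_eq, List.length_cons]; push_cast; omega)]
    rw [if_neg (by simp only [PySem.List.len_eq, List.length_cons]; push_cast; omega)]
  by_cases h6 : PySem.Chars.startswith cs "typed_primary.".toList = true
  ·
    rw [PySem.Chars.startswith_iff] at h6
    obtain ⟨t, ht⟩ := h6
    have hcs : cs = "typed_primary".toList ++ '.' :: t := by rw [← ht]; rfl
    subst hcs
    have hpos : PySem.Chars.startswith ("typed_primary".toList ++ '.' :: t) "typed_primary.".toList = true := by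
      rw [PySem.Chars.startswith_iff]; exact ⟨t, rfl⟩
    simp only [pvInferSlotA]
    rw [if_neg h1, if_neg h2, if_neg h3, pvA_primary, if_neg h4, pvA_pair, if_neg h5, pvA_typedPrimary, if_pos hpos]
    simp only [pvInferSlotB]
    rw [pvSplitOn_eq, pvSplitDot_append _ (by decide) _]
    rw [PySem.List.pyGetD_zero_cons]
    rw [show pvSlotDepth.getD "typed_primary".toList 1 = 2 from by decide]
    have hlen : 1 ≤ (pvSplitDot t).length := List.length_pos_of_ne_nil (pvSplitDot_ne_nil t)
    rw [if_pos (by simp only [PySem.List.len_eq, List.length_cons]; push_cast; omega)]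
    rw [if_neg (by simp only [PySem.List.len_eq, List.length_cons]; push_cast; omega)]
  by_cases h7 : PySem.Chars.startswith cs "typed_pair.".toList = true
  ·
    rw [PySem.Chars.startswith_iff] at h7
    obtain ⟨t, ht⟩ := h7
    have hcs : cs = "typed_pair".toList ++ '.' :: t := by rw [← ht]; rfl
    subst hcs
    have hpos : PySem.Chars.startswith ("typed_pair".toList ++ '.' :: t) "typed_pair.".toList = true := by
      rw [PySem.Chars.startswith_iff]; exact ⟨t, rfl⟩
    simp only [pvInferSlotA]
    rw [if_neg h1, if_neg h2, if_neg h3, pvA_primary, if_neg h4, pvA_pair, if_neg h5, pvA_typedPrimary, if_neg h6, pvA_typedPair, if_pos hpos]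
    simp only [pvInferSlotB]
    rw [pvSplitOn_eq, pvSplitDot_append _ (by decide) _]
    rw [PySem.List.pyGetD_zero_cons]
    rw [show pvSlotDepth.getD "typed_pair".toList 1 = 2 from by decide]
    have hlen : 1 ≤ (pvSplitDot t).length := List.length_pos_of_ne_nil (pvSplitDot_ne_nil t)
    rw [if_pos (by simp only [PySem.List.len_eq, List.length_cons]; push_cast; omega)]
    rw [if_neg (by simp only [PySem.List.len_eq, List.length_cons]; push_cast; omega)]
  by_cases h8 : PySem.Chars.startswith cs "strat.".toList = true
  ·
    rw [PySem.Chars.startswith_iff] at h8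
    obtain ⟨t, ht⟩ := h8
    have hcs : cs = "strat".toList ++ '.' :: t := by rw [← ht]; rfl
    subst hcs
    have hpos : PySem.Chars.startswith ("strat".toList ++ '.' :: t) "strat.".toList = true := by
      rw [PySem.Chars.startswith_iff]; exact ⟨t, rfl⟩
    simp only [pvInferSlotA]
    rw [if_neg h1, if_neg h2, if_neg h3, pvA_primary, if_neg h4, pvA_pair, if_neg h5, pvA_typedPrimary, if_neg h6, pvA_typedPair, if_neg h7, pvA_strat, if_pos hpos]
    simp only [pvInferSlotB]
    rw [pvSplitOn_eq, pvSplitDot_append _ (by decide) _]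
    rw [PySem.List.pyGetD_zero_cons]
    rw [show pvSlotDepth.getD "strat".toList 1 = 4 from by decide]
    have hlen : 1 ≤ (pvSplitDot t).length := List.length_pos_of_ne_nil (pvSplitDot_ne_nil t)
    by_cases h4p : (4 : Int) ≤ PySem.List.len ("strat".toList :: pvSplitDot t)
    · rw [if_pos h4p, if_neg (by simp only [PySem.List.len_eq, List.length_cons] at h4p ⊢; push_cast at h4p ⊢; omega)]
    · rw [if_neg h4p, if_pos (by simp only [PySem.List.len_eq, List.length_cons] at h4p ⊢; push_cast at h4p ⊢; omega)]
      rw [pvA_default_eq, pv_takeWhile_pre _ (by decide) _]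
      rw [PySem.List.slice_to _ (by norm_num)]
      simp [PySem.Chars.join_singleton]
  -- no prefix matches
  simp only [pvInferSlotA]
  rw [if_neg h1, if_neg h2, if_neg h3, pvA_primary, if_neg h4, pvA_pair, if_neg h5, pvA_typedPrimary, if_neg h6, pvA_typedPair, if_neg h7, pvA_strat, if_neg h8, pvA_default_eq]
  simp only [pvInferSlotB]
  rw [pvSplitOn_eq]
  by_cases hdot : '.' ∈ cs
  · obtain ⟨r, hdec, hnd⟩ := pv_dot_decomp cs hdot
    generalize hteq : cs.takeWhile (· ≠ '.') = t at hdec hnd ⊢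
    subst hdec
    rw [pvSplitDot_append _ hnd _, PySem.List.pyGetD_zero_cons]
    have hlen : 1 ≤ (pvSplitDot r).length := List.length_pos_of_ne_nil (pvSplitDot_ne_nil r)
    rcases pvDepth_cases t with hd | ⟨hd, hk⟩ | ⟨hd, hk⟩
    · rw [hd, if_neg (by simp only [PySem.List.len_eq, List.length_cons]; push_cast; omega)]
      rw [PySem.List.slice_to _ (by norm_num)]
      simp [PySem.Chars.join_singleton]
    · exfalso
      rcases hk with hk | hk | hk | hk <;> subst hk
      · exact h4 (by rw [PySem.Chars.startswith_iff]; exact ⟨r, rfl⟩)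
      · exact h5 (by rw [PySem.Chars.startswith_iff]; exact ⟨r, rfl⟩)
      · exact h6 (by rw [PySem.Chars.startswith_iff]; exact ⟨r, rfl⟩)
      · exact h7 (by rw [PySem.Chars.startswith_iff]; exact ⟨r, rfl⟩)
    · subst hk
      exact absurd (by rw [PySem.Chars.startswith_iff]; exact ⟨r, rfl⟩) h8
  · rw [pv_takeWhile_no_dot cs hdot, pvSplitDot_no_dot cs hdot, PySem.List.pyGetD_zero_cons]
    rcases pvDepth_cases cs with hd | ⟨hd, _⟩ | ⟨hd, _⟩
    · rw [hd, if_neg (by simp [PySem.List.len_eq])]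
      rw [PySem.List.slice_to _ (by norm_num)]
      simp [PySem.Chars.join_singleton]
    · rw [hd, if_pos (by simp [PySem.List.len_eq])]
      rw [PySem.List.slice_to _ (by norm_num)]
      simp [PySem.Chars.join_singleton]
    · rw [hd, if_pos (by simp [PySem.List.len_eq])]
      rw [PySem.List.slice_to _ (by norm_num)]
      simp [PySem.Chars.join_singleton]

-- A's grouping loop, characterised: items = one pair per distinct slot (first-occurrence
-- order), carrying the columns mapped to it, in input order.
theorem pv_items_A (cols : List String) (f : String → String) :
    (cols.foldl (fun d c => d.modify (f c) [] (fun l => l ++ [c]))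
        (PySem.Dict.empty : PySem.Dict String (List String))).items
      = (PySem.Set.ofList (cols.map f)).map
          (fun s => (s, cols.filter (fun c => f c == s))) := by
  have hfold : (cols.foldl (fun d c => d.modify (f c) [] (fun l => l ++ [c]))
        (PySem.Dict.empty : PySem.Dict String (List String)))
      = ((cols.map (fun c => (f c, c))).foldl
          (fun d p => d.modify p.1 [] (fun l => l ++ [p.2]))
          (PySem.Dict.empty : PySem.Dict String (List String))) := by
    rw [List.foldl_map]
  have hkeys : (cols.foldl (fun d c => d.modify (f c) [] (fun l => l ++ [c]))
        (PySem.Dict.empty : PySem.Dict String (List String))).keys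
      = PySem.Set.ofList (cols.map f) := by
    rw [PySem.Dict.keys_foldl_modify_key]
    simp [PySem.Set.update_nil_left]
  have hnd := hkeys ▸ PySem.Set.nodup_ofList (cols.map f)
  rw [PySem.Dict.items_eq_map_keys _ hnd [], hkeys]
  refine List.map_congr_left ?_
  intro s _
  rw [hfold, PySem.Dict.getD_foldl_modify_append]
  simp [List.filter_map, Function.comp_def]

-- zip-with-own-map filter collapses to a plain filter
theorem pv_zip_filter (cols : List String) (f : String → String) (s : String) :
    (((cols.zip (cols.map f)).filter (fun p => p.2 == s)).map (fun p => p.1))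
      = cols.filter (fun c => f c == s) := by
  induction cols with
  | nil => rfl
  | cons c cs ih =>
    by_cases h : f c == s
    · simp only [List.map_cons, List.zip_cons_cons, List.filter_cons, h]
      simp [ih]
    · simp only [List.map_cons, List.zip_cons_cons, List.filter_cons, h]
      simp only [Bool.false_eq_true, if_false]
      exact ih

-- a dict comprehension over distinct keys lists exactly its pairs
theorem pv_items_ofList_nodup (pairs : List (String × List String))
    (h : (pairs.map Prod.fst).Nodup) :
    (PySem.Dict.ofList pairs).items = pairs := by
  rw [PySem.Dict.ofList, PySem.Dict.update]
  rw [PySem.Dict.items_foldl_insert_fresh pairs Prod.fst Prod.snd PySem.Dict.empty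
    (fun a _ => PySem.Dict.contains_empty _) h]
  simp [PySem.Dict.empty]

-- ===== VERDICT (by name: the statement is the Claim_ definition above) =====
theorem group_topology_columns_py_spec : Claim_equal_group_topology_columns_py := by
  intro topo_cols mode _
  unfold Spec_group_topology_columns_py
  unfold group_topology_columns_py group_topology_columns_py_alt
  by_cases hm : mode == "column"
  · rw [if_pos hm, if_pos hm]
    rw [PySem.Dict.ofList, PySem.Dict.update, List.foldl_map]
  · rw [if_neg hm, if_neg hm]
    rw [pv_items_A topo_cols (fun c => String.ofList (pvInferSlotA c.toList))]
    simp only [pvInfer_eq]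
    rw [pv_items_ofList_nodup _ (by
      simp only [List.map_map, Function.comp_def, PySem.List.dedup_eq_ofList]
      simpa using PySem.Set.nodup_ofList
        (topo_cols.map fun col => String.ofList (pvInferSlotB col.toList)))]
    simp only [PySem.List.dedup_eq_ofList]
    refine List.map_congr_left ?_
    intro s _
    rw [pv_zip_filter]
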